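-- pv_equiv track=rewrite | github.com/evolv3ai/rev-ideas | tools/mcp/gaea2/optimization/analyzer.py | _get_quality_suggestions
-- ===== SOURCE A (Python) =====
-- from typing import Any, Dict, List, Optional
--
-- def _get_quality_suggestions(nodes: List[Dict[str, Any]]) -> List[str]:
--     """Get quality enhancement suggestions"""
--     suggestions = []
--     node_types = [n.get("type", n.get("node_type")) for n in nodes]
--
--     if "Erosion2" not in node_types:
--         suggestions.append("Add Erosion2 for more realistic terrain")
--
--     if "SatMap" not in node_types:
--         suggestions.append("Add SatMap for color mapping")
--
--     return suggestions
-- ===== SOURCE B (Python) =====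
-- def _get_quality_suggestions(nodes):
--     """Get quality enhancement suggestions (single pass with flags)"""
--     has_erosion2 = False
--     has_satmap = False
--     for n in nodes:
--         if has_erosion2 and has_satmap:
--             break
--         t = n.get("type", n.get("node_type"))
--         if t == "Erosion2":
--             has_erosion2 = True
--         elif t == "SatMap":
--             has_satmap = True
--     suggestions = []
--     if not has_erosion2:
--         suggestions.append("Add Erosion2 for more realistic terrain")
--     if not has_satmap:
--         suggestions.append("Add SatMap for color mapping")
--     return suggestions
-- ===== Notes on version B (the rewrite author's own statement) =====
-- stated objective: alternative
-- what changed: Replaces build-the-full-node_types-list plus two membership scans with a single early-exiting pass that maintains two boolean flags and never materialises the intermediate list.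
import Mathlib
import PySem

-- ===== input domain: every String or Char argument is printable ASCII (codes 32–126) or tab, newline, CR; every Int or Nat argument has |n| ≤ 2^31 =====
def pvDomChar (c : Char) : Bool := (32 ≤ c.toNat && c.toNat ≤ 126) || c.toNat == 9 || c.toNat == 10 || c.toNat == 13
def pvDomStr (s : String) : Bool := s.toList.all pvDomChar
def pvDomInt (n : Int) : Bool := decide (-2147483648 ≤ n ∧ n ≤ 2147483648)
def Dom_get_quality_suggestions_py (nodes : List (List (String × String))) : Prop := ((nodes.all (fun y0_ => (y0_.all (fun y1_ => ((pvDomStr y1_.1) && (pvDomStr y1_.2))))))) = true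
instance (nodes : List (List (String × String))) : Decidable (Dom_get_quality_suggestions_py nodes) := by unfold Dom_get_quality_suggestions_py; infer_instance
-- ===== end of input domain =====

-- B replaces the node_types list plus two membership scans by one early-exiting pass with two flags (objective: alternative).

-- ===== PORT A =====
-- n.get("type", n.get("node_type"))
def pvNodeType (n : List (String × String)) : Option String :=
  match PySem.Dict.get? (PySem.Dict.mk n) "type" with
  | some v => some v
  | none => PySem.Dict.get? (PySem.Dict.mk n) "node_type"

def get_quality_suggestions_py (nodes : List (List (String × String))) : List String :=
  let suggestions : List String := []
  let node_types := nodes.map pvNodeType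
  let suggestions := if (some "Erosion2") ∉ node_types then suggestions ++ ["Add Erosion2 for more realistic terrain"] else suggestions
  let suggestions := if (some "SatMap") ∉ node_types then suggestions ++ ["Add SatMap for color mapping"] else suggestions
  suggestions

-- ===== PORT B =====
-- the for-loop of Source B: carries the two flags, breaks when both are set
def pvFlags : List (List (String × String)) → Bool → Bool → Bool × Bool
  | [], hasE, hasS => (hasE, hasS)
  | n :: rest, hasE, hasS =>
    if hasE && hasS then (hasE, hasS)
    else
      let t := match PySem.Dict.get? (PySem.Dict.mk n) "type" with
        | some v => some v
        | none => PySem.Dict.get? (PySem.Dict.mk n) "node_type"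
      if t == some "Erosion2" then pvFlags rest true hasS
      else if t == some "SatMap" then pvFlags rest hasE true
      else pvFlags rest hasE hasS

def get_quality_suggestions_py_alt (nodes : List (List (String × String))) : List String :=
  let (hasE, hasS) := pvFlags nodes false false
  (if !hasE then ["Add Erosion2 for more realistic terrain"] else []) ++
  (if !hasS then ["Add SatMap for color mapping"] else [])

-- ===== PRECONDITION & SPEC =====
def Spec_get_quality_suggestions_py (nodes : List (List (String × String))) (out : List String) : Prop := out = get_quality_suggestions_py_alt nodes
instance (nodes : List (List (String × String))) (out : List String) : Decidable (Spec_get_quality_suggestions_py nodes out) := by unfold Spec_get_quality_suggestions_py; infer_instance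

-- ===== CLAIM (what is proved, stated in full; the proofs are below) =====
def Claim_equal_get_quality_suggestions_py : Prop := ∀ (nodes : List (List (String × String))), Dom_get_quality_suggestions_py nodes → Spec_get_quality_suggestions_py nodes (get_quality_suggestions_py nodes)

-- ===== LEMMAS AND PROOFS =====

-- the flag loop computes exactly the two memberships A tests
theorem pvFlags_eq (nodes : List (List (String × String))) (hasE hasS : Bool) :
    pvFlags nodes hasE hasS =
      (hasE || decide ((some "Erosion2") ∈ nodes.map pvNodeType),
       hasS || decide ((some "SatMap") ∈ nodes.map pvNodeType)) := by
  induction nodes generalizing hasE hasS with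
  | nil => simp [pvFlags]
  | cons n rest ih =>
    simp only [pvFlags, List.map_cons, List.mem_cons]
    by_cases hES : hasE && hasS
    · rcases Bool.and_eq_true_iff.mp hES with ⟨hE, hS⟩
      subst hE; subst hS
      simp
    · simp only [hES]
      have ht : (match PySem.Dict.get? (PySem.Dict.mk n) "type" with
        | some v => some v
        | none => PySem.Dict.get? (PySem.Dict.mk n) "node_type") = pvNodeType n := rfl
      rw [ht]
      by_cases h1 : pvNodeType n = some "Erosion2"
      · have h2 : pvNodeType n ≠ some "SatMap" := by rw [h1]; decide
        simp [h1, ih]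
      · by_cases h2 : pvNodeType n = some "SatMap"
        · simp [h2, ih]
        · simp [h1, h2, ih, Ne.symm h1, Ne.symm h2]

-- ===== VERDICT (by name: the statement is the Claim_ definition above) =====
theorem get_quality_suggestions_py_spec : Claim_equal_get_quality_suggestions_py := by
  intro nodes _
  unfold Spec_get_quality_suggestions_py get_quality_suggestions_py get_quality_suggestions_py_alt
  rw [pvFlags_eq]
  by_cases h1 : (some "Erosion2") ∈ nodes.map pvNodeType <;>
    by_cases h2 : (some "SatMap") ∈ nodes.map pvNodeType <;>
      simp [h1, h2]
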